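-- pv_equiv track=rewrite | github.com/Sean-Blank/AMRcoref | dataloader.py | get_concept_labels
-- ===== SOURCE A (Python) =====
-- def get_concept_labels(cluster, cluster_labels, concepts):
--     concept_labels = []
--     cluster = [item for sublist in cluster for item in sublist]
--     cluster_labels = [item for sublist in cluster_labels for item in sublist]
--     for i in range(len(concepts)):
--         if i in cluster:
--             concept_labels.append(cluster_labels[cluster.index(i)])
--         else:
--             concept_labels.append(-2)
--     a = [i + 2 for i in concept_labels]
--     return a
-- ===== SOURCE B (Python) =====
-- def get_concept_labels(cluster, cluster_labels, concepts):
--     # One scatter pass over zipped (index, label) pairs instead of a per-concept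
--     # membership test + list.index scan; first occurrence wins via a seen-set.
--     n = len(concepts)
--     result = [0] * n
--     seen = set()
--     flat_c = [item for sublist in cluster for item in sublist]
--     flat_l = [item for sublist in cluster_labels for item in sublist]
--     for idx, lab in zip(flat_c, flat_l):
--         if 0 <= idx < n and idx not in seen:
--             result[idx] = lab + 2
--             seen.add(idx)
--     return result
-- ===== Notes on version B (the rewrite author's own statement) =====
-- stated objective: faster
-- what changed: Replaces A's per-concept 'i in cluster' membership test plus cluster.index(i) rescans with a single scatter pass over the zipped (index,label) pairs into a preallocated result, using a seen-set so the first occurrence wins.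
import Mathlib
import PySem

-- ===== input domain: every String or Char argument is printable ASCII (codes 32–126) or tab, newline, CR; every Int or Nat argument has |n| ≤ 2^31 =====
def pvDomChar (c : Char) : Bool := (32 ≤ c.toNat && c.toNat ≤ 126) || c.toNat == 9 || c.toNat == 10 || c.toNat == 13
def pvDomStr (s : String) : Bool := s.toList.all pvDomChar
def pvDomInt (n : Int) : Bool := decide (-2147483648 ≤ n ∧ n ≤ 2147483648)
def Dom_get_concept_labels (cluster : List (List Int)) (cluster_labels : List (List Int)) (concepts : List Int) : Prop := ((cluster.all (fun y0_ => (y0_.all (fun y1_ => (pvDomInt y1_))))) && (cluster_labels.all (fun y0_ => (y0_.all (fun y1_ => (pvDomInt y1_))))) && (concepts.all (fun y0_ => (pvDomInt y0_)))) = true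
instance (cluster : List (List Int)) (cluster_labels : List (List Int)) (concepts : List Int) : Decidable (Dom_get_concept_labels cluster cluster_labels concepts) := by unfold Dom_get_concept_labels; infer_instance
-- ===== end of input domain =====

-- B replaces A's per-concept membership test + list.index scan by a single
-- scatter pass over the zipped (index, label) pairs with a seen-set
-- (first occurrence wins); objective: faster (O(n+m) vs O(n*m)).

-- ===== PORT A =====
def get_concept_labels (cluster : List (List Int)) (cluster_labels : List (List Int)) (concepts : List Int) : List Int :=
  let c := cluster.flatten
  let cl := cluster_labels.flatten
  let concept_labels := (List.range concepts.length).foldl (fun (acc : List Int) (i : Nat) =>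
    if c.contains (i : Int) then
      acc ++ [PySem.List.pyGetD cl (((PySem.List.index? c (i : Int)).getD 0 : Nat) : Int) 0]
    else
      acc ++ [(-2 : Int)]) []
  concept_labels.map (fun i => i + 2)

-- ===== PORT B =====
def get_concept_labels_alt (cluster : List (List Int)) (cluster_labels : List (List Int)) (concepts : List Int) : List Int :=
  let n := concepts.length
  let result : List Int := concepts.map (fun _ => 0)
  let flat_c := cluster.flatten
  let flat_l := cluster_labels.flatten
  let out := (flat_c.zip flat_l).foldl
    (fun (st : List Int × PySem.Set Int) p =>
      if 0 ≤ p.1 ∧ p.1 < (n : Int) ∧ ¬ PySem.Set.contains st.2 p.1 then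
        (PySem.List.pySetD st.1 p.1 (p.2 + 2), PySem.Set.add st.2 p.1)
      else st)
    (result, PySem.Set.empty)
  out.1

-- ===== PRECONDITION & SPEC =====
-- Pre_ excludes exactly the inputs where A raises IndexError: some concept index i
-- occurs in the flattened cluster but its first-occurrence position is not a valid
-- position of the flattened cluster_labels.
def Pre_get_concept_labels (cluster : List (List Int)) (cluster_labels : List (List Int)) (concepts : List Int) : Prop :=
  ∀ i ∈ List.range concepts.length, ∀ k,
    PySem.List.index? cluster.flatten (i : Int) = some k → k < cluster_labels.flatten.length
instance (cluster : List (List Int)) (cluster_labels : List (List Int)) (concepts : List Int) : Decidable (Pre_get_concept_labels cluster cluster_labels concepts) := by unfold Pre_get_concept_labels; infer_instance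

def pvWitness_get_concept_labels : List (List Int) × List (List Int) × List Int :=
  ([[0], [2, 0]], [[5], [7, 9]], [4, 4, 4])

def Spec_get_concept_labels (cluster : List (List Int)) (cluster_labels : List (List Int)) (concepts : List Int) (out : List Int) : Prop := out = get_concept_labels_alt cluster cluster_labels concepts
instance (cluster : List (List Int)) (cluster_labels : List (List Int)) (concepts : List Int) (out : List Int) : Decidable (Spec_get_concept_labels cluster cluster_labels concepts out) := by unfold Spec_get_concept_labels; infer_instance

-- ===== CLAIM (what is proved, stated in full; the proofs are below) =====
def Claim_equal_get_concept_labels : Prop := ∀ (cluster : List (List Int)) (cluster_labels : List (List Int)) (concepts : List Int), Dom_get_concept_labels cluster cluster_labels concepts → Pre_get_concept_labels cluster cluster_labels concepts → Spec_get_concept_labels cluster cluster_labels concepts (get_concept_labels cluster cluster_labels concepts)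

-- ===== LEMMAS AND PROOFS =====

-- the scatter step of B, abstracted over n
def pvStep (n : Nat) (st : List Int × PySem.Set Int) (p : Int × Int) : List Int × PySem.Set Int :=
  if 0 ≤ p.1 ∧ p.1 < (n : Int) ∧ ¬ PySem.Set.contains st.2 p.1 then
    (PySem.List.pySetD st.1 p.1 (p.2 + 2), PySem.Set.add st.2 p.1)
  else st

lemma pvStep_length (n : Nat) (st : List Int × PySem.Set Int) (p : Int × Int) :
    ((pvStep n st p).1).length = st.1.length := by
  unfold pvStep
  split
  · simp [PySem.List.length_pySetD]
  · rfl

lemma pvScatter_length (n : Nat) (pairs : List (Int × Int)) :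
    ∀ (st : List Int × PySem.Set Int),
      ((pairs.foldl (pvStep n) st).1).length = st.1.length := by
  induction pairs with
  | nil => intro st; rfl
  | cons p ps ih => intro st; simp only [List.foldl_cons]; rw [ih, pvStep_length]

lemma pvScatter_get (n : Nat) (pairs : List (Int × Int)) :
    ∀ (r : List Int) (s : PySem.Set Int), r.length = n →
      ∀ j, j < n →
        ((pairs.foldl (pvStep n) (r, s)).1).getD j 0 =
          if (j : Int) ∈ s then r.getD j 0
          else
            match pairs.find? (fun p => p.1 == (j : Int)) with
            | some p => p.2 + 2
            | none => r.getD j 0 := by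
  induction pairs with
  | nil =>
    intro r s hr j hj
    simp only [List.foldl_nil, List.find?_nil]
    split <;> rfl
  | cons p ps ih =>
    intro r s hr j hj
    simp only [List.foldl_cons]
    by_cases hg : 0 ≤ p.1 ∧ p.1 < (n : Int) ∧ ¬ PySem.Set.contains s p.1
    · have hstep : pvStep n (r, s) p =
        (PySem.List.pySetD r p.1 (p.2 + 2), PySem.Set.add s p.1) := by
        unfold pvStep; rw [if_pos hg]
      rw [hstep]
      have hset : PySem.List.pySetD r p.1 (p.2 + 2) = r.set p.1.toNat (p.2 + 2) :=
        PySem.List.pySetD_of_nonneg _ _ hg.1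
      have hlen' : (PySem.List.pySetD r p.1 (p.2 + 2)).length = n := by
        rw [hset]; simpa using hr
      rw [ih _ _ hlen' j hj]
      have hmem_add : ((j : Int) ∈ PySem.Set.add s p.1) ↔ ((j : Int) ∈ s ∨ (j : Int) = p.1) :=
        PySem.Set.mem_add _ _ _
      have hps : ¬ (p.1 : Int) ∈ s := by
        intro h; exact hg.2.2 (by simpa [PySem.Set.contains_iff] using h)
      by_cases hj_s : (j : Int) ∈ s
      · -- j already seen: head cannot be j, value untouched
        have hne : p.1 ≠ (j : Int) := by intro h; rw [h] at hps; exact hps hj_s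
        have hne' : p.1.toNat ≠ j := by
          intro h; apply hne; omega
        have hget : (PySem.List.pySetD r p.1 (p.2 + 2)).getD j 0 = r.getD j 0 := by
          simp [hset, List.getD, List.getElem?_set, hne']
        rw [if_pos (hmem_add.mpr (Or.inl hj_s)), hget, if_pos hj_s]
      · by_cases hpj : p.1 = (j : Int)
        · -- head writes j
          have hsadd : (j : Int) ∈ PySem.Set.add s p.1 := hmem_add.mpr (Or.inr hpj.symm)
          have htn : p.1.toNat = j := by omega
          have hget : (PySem.List.pySetD r p.1 (p.2 + 2)).getD j 0 = p.2 + 2 := by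
            simp [hset, htn, List.getD, List.getElem?_set, show j < r.length by omega]
          rw [if_pos hsadd, hget, if_neg hj_s]
          have hfind : (p :: ps).find? (fun q => q.1 == (j : Int)) = some p := by
            simp [List.find?_cons, hpj]
          rw [hfind]
        · -- head is a different index
          have hnadd : ¬ (j : Int) ∈ PySem.Set.add s p.1 := by
            rw [hmem_add]; rintro (h | h); exact hj_s h; exact hpj h.symm
          have hne' : p.1.toNat ≠ j := by intro h; apply hpj; omega
          have hget : (PySem.List.pySetD r p.1 (p.2 + 2)).getD j 0 = r.getD j 0 := by
            simp [hset, List.getD, List.getElem?_set, hne']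
          rw [if_neg hnadd, if_neg hj_s, hget]
          have hfind : (p :: ps).find? (fun q => q.1 == (j : Int)) =
              ps.find? (fun q => q.1 == (j : Int)) := by
            simp [List.find?_cons, hpj]
          rw [hfind]
    · have hstep : pvStep n (r, s) p = (r, s) := by
        unfold pvStep; rw [if_neg hg]
      rw [hstep, ih _ _ hr j hj]
      by_cases hj_s : (j : Int) ∈ s
      · simp [hj_s]
      · rw [if_neg hj_s, if_neg hj_s]
        have hpj : ¬ p.1 = (j : Int) := by
          intro h; apply hg; rw [h]
          exact ⟨Int.natCast_nonneg j, by exact_mod_cast hj,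
            by simpa [PySem.Set.contains_iff] using hj_s⟩
        have hfind : (p :: ps).find? (fun q => q.1 == (j : Int)) =
            ps.find? (fun q => q.1 == (j : Int)) := by
          simp [List.find?_cons, hpj]
        rw [hfind]

-- first occurrence at k, k < ys.length ⇒ zip's first match is (v, ys[k])
lemma pvZip_find_of_index (v : Int) :
    ∀ (xs ys : List Int) (k : Nat), PySem.List.index? xs v = some k →
      ∀ (hk : k < ys.length),
        (xs.zip ys).find? (fun p => p.1 == v) = some (v, ys[k]) := by
  intro xs
  induction xs with
  | nil => intro ys k h; simp [PySem.List.index?] at h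
  | cons x xs ih =>
    intro ys k h hk
    by_cases hxv : x = v
    · subst hxv
      rw [PySem.List.index?_cons_self] at h
      cases h
      cases ys with
      | nil => simp at hk
      | cons y ys => simp [List.zip_cons_cons, List.find?_cons]
    · rw [PySem.List.index?_cons_of_ne _ hxv] at h
      cases hidx : PySem.List.index? xs v with
      | none => rw [hidx] at h; simp at h
      | some k' =>
        rw [hidx] at h
        simp only [Option.map_some] at h
        cases h
        cases ys with
        | nil => simp at hk
        | cons y ys =>
          have hskip : ((x, y) :: xs.zip ys).find? (fun p => p.1 == v) =
              (xs.zip ys).find? (fun p => p.1 == v) := by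
            simp [List.find?_cons, hxv]
          simpa [List.zip_cons_cons, hskip] using ih ys k' hidx (by simpa using hk)

lemma pvZip_find_none (v : Int) :
    ∀ (xs ys : List Int), v ∉ xs → (xs.zip ys).find? (fun p => p.1 == v) = none := by
  intro xs
  induction xs with
  | nil => intro ys _; simp
  | cons x xs ih =>
    intro ys hv
    cases ys with
    | nil => simp
    | cons y ys =>
      have hxv : ¬ x = v := fun h => hv (by simp [h])
      have hskip : ((x, y) :: xs.zip ys).find? (fun p => p.1 == v) =
          (xs.zip ys).find? (fun p => p.1 == v) := by
        simp [List.find?_cons, hxv]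
      rw [List.zip_cons_cons, hskip]
      exact ih ys (fun h => hv (by simp [h]))

-- ===== VERDICT (by name: the statement is the Claim_ definition above) =====
theorem get_concept_labels_spec : Claim_equal_get_concept_labels := by
  intro cluster cluster_labels concepts _ hpre
  unfold Spec_get_concept_labels get_concept_labels get_concept_labels_alt
  dsimp only
  set n := concepts.length with hn
  set fc := cluster.flatten with hfc
  set fl := cluster_labels.flatten with hfl
  rw [show (fun (st : List Int × PySem.Set Int) (p : Int × Int) =>
      if 0 ≤ p.1 ∧ p.1 < (n : Int) ∧ ¬ PySem.Set.contains st.2 p.1 then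
        (PySem.List.pySetD st.1 p.1 (p.2 + 2), PySem.Set.add st.2 p.1)
      else st) = pvStep n from rfl]
  have hA : (List.range n).foldl (fun (acc : List Int) (i : Nat) =>
      if fc.contains (i : Int) then
        acc ++ [PySem.List.pyGetD fl (((PySem.List.index? fc (i : Int)).getD 0 : Nat) : Int) 0]
      else acc ++ [(-2 : Int)]) [] =
      (List.range n).map (fun (i : Nat) =>
        if fc.contains (i : Int) then
          PySem.List.pyGetD fl (((PySem.List.index? fc (i : Int)).getD 0 : Nat) : Int) 0
        else (-2 : Int)) := by
    have h1 : (fun (acc : List Int) (i : Nat) =>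
        if fc.contains (i : Int) then
          acc ++ [PySem.List.pyGetD fl (((PySem.List.index? fc (i : Int)).getD 0 : Nat) : Int) 0]
        else acc ++ [(-2 : Int)]) =
        (fun (acc : List Int) (i : Nat) => acc ++
          [if fc.contains (i : Int) then
             PySem.List.pyGetD fl (((PySem.List.index? fc (i : Int)).getD 0 : Nat) : Int) 0
           else (-2 : Int)]) := by
      funext acc i; split <;> rfl
    rw [h1, PySem.List.foldl_append_singleton_eq_map, List.nil_append]
  rw [hA]
  have hrlen : (concepts.map (fun _ => (0 : Int))).length = n := by simp [hn]
  apply List.ext_getElem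
  · simp [pvScatter_length, hn]
  · intro j hj1 hj2
    have hjn : j < n := by simpa using hj1
    rw [List.getElem_map, List.getElem_map, List.getElem_range]
    rw [show ((fc.zip fl).foldl (pvStep n) (concepts.map (fun _ => (0 : Int)), PySem.Set.empty)).1[j]'hj2 =
        (((fc.zip fl).foldl (pvStep n) (concepts.map (fun _ => (0 : Int)), PySem.Set.empty)).1).getD j 0 from
      (List.getD_eq_getElem _ _ hj2).symm]
    rw [pvScatter_get n (fc.zip fl) _ _ hrlen j hjn]
    have hnotmem : ¬ (j : Int) ∈ (PySem.Set.empty : PySem.Set Int) := by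
      simp [PySem.Set.empty]
    rw [if_neg hnotmem]
    by_cases hmem : (j : Int) ∈ fc
    · obtain ⟨k, hk⟩ := Option.isSome_iff_exists.mp
        ((PySem.List.index?_isSome_iff _ _).mpr hmem)
      have hklt : k < fl.length := hpre j (by simpa using hjn) k hk
      rw [pvZip_find_of_index (j : Int) fc fl k hk hklt]
      have hgd : PySem.List.pyGetD fl ((k : Nat) : Int) 0 = fl[k] := by
        rw [PySem.List.pyGetD_natCast]; simp [List.getD, hklt]
      rw [if_pos (by simpa using hmem), hk]
      simp only [Option.getD_some, hgd]
    · rw [pvZip_find_none (j : Int) fc fl hmem]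
      rw [if_neg (by simpa using hmem)]
      have h0 : (concepts.map (fun _ => (0 : Int))).getD j 0 = 0 := by
        simp [List.getD]
      rw [h0]; norm_num
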